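-- pv_equiv track=rewrite | github.com/rifatmilon/University-and-related-Projects | New folder/dip/assignment.py | calculate_moments
-- ===== SOURCE A (Python) =====
-- def calculate_moments(matrix):
--     m00 = 0
--     m10 = 0
--     m01 = 0
--
--     for i in range(len(matrix)):
--         for j in range(len(matrix[0])):
--             if matrix[i][j] == 1:
--                 m00 += 1
--                 m10 += j + 1
--                 m01 += i + 1
--     return m10, m01, m00
-- ===== SOURCE B (Python) =====
-- def calculate_moments(matrix):
--     nrows = len(matrix)
--     ncols = len(matrix[0]) if matrix else 0
--     m00 = sum(sum(row[j] == 1 for j in range(ncols)) for row in matrix)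
--     m10 = sum((j + 1) * sum(row[j] == 1 for row in matrix) for j in range(ncols))
--     m01 = sum((i + 1) * sum(matrix[i][j] == 1 for j in range(ncols)) for i in range(nrows))
--     return m10, m01, m00
-- ===== Notes on version B (the rewrite author's own statement) =====
-- stated objective: alternative
-- what changed: B replaces A's single nested imperative scan with three shared accumulators by three independent declarative sums: m00 as a sum of per-row indicator sums, m10 column-major as sum over j of (j+1) times the count of ones in column j, and m01 as sum over i of (i+1) times the count of ones in row i; equality uses commutativity of the double sum.
import Mathlib
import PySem

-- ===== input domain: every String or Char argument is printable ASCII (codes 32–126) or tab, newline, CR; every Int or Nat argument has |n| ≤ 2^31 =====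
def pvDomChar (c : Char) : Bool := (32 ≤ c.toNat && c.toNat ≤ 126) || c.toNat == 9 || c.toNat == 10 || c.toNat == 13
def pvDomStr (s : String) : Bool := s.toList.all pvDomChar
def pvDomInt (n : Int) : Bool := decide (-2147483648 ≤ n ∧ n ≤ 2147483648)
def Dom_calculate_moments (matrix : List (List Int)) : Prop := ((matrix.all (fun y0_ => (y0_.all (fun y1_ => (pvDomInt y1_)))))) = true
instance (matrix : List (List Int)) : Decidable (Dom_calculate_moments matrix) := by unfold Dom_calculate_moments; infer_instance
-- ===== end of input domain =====

-- B replaces A's single accumulating nested scan by three independent declarative sums: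
-- m00 row-wise, m10 as a column-major weighted column-count sum, m01 as a weighted row-count sum
-- (alternative decomposition, same cost).

-- ===== PORT A =====
-- per-pixel accumulation over index ranges; state is (m00, m10, m01)
def calculate_moments (matrix : List (List Int)) : Int × Int × Int :=
  let s := (PySem.List.pyRange 0 matrix.length 1).foldl (fun (s : Int × Int × Int) i =>
      (PySem.List.pyRange 0 ((PySem.List.pyGetD matrix 0 []).length : Int) 1).foldl
        (fun (s : Int × Int × Int) j =>
          if PySem.List.pyGetD (PySem.List.pyGetD matrix i []) j 0 = 1 then
            (s.1 + 1, s.2.1 + (j + 1), s.2.2 + (i + 1))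
          else s) s)
    (0, 0, 0)
  (s.2.1, s.2.2, s.1)

-- ===== PORT B =====
-- staged closed-form sums; no shared accumulator state
def calculate_moments_alt (matrix : List (List Int)) : Int × Int × Int :=
  let nrows : Int := (matrix.length : Int)
  let ncols : Int := if matrix = [] then 0 else ((matrix.headD []).length : Int)
  let m00 := (matrix.map (fun row =>
      ((PySem.List.pyRange 0 ncols 1).map
        (fun j => if PySem.List.pyGetD row j 0 = 1 then (1 : Int) else 0)).sum)).sum
  let m10 := ((PySem.List.pyRange 0 ncols 1).map (fun j =>
      (j + 1) * (matrix.map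
        (fun row => if PySem.List.pyGetD row j 0 = 1 then (1 : Int) else 0)).sum)).sum
  let m01 := ((PySem.List.pyRange 0 nrows 1).map (fun i =>
      (i + 1) * ((PySem.List.pyRange 0 ncols 1).map
        (fun j => if PySem.List.pyGetD (PySem.List.pyGetD matrix i []) j 0 = 1 then (1 : Int) else 0)).sum)).sum
  (m10, m01, m00)

-- ===== PRECONDITION & SPEC =====
-- Pre_ excludes ragged matrices whose later rows are shorter than the first row:
-- there Python A (and B) raise IndexError.
def Pre_calculate_moments (matrix : List (List Int)) : Prop :=
  ∀ row ∈ matrix, (matrix.headD []).length ≤ row.length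

instance (matrix : List (List Int)) : Decidable (Pre_calculate_moments matrix) := by
  unfold Pre_calculate_moments; infer_instance

def pvWitness_calculate_moments : List (List Int) := [[1, 0], [0, 1]]

def Spec_calculate_moments (matrix : List (List Int)) (out : Int × Int × Int) : Prop := out = calculate_moments_alt matrix
instance (matrix : List (List Int)) (out : Int × Int × Int) : Decidable (Spec_calculate_moments matrix out) := by unfold Spec_calculate_moments; infer_instance

-- ===== CLAIM (what is proved, stated in full; the proofs are below) =====
def Claim_equal_calculate_moments : Prop := ∀ (matrix : List (List Int)), Dom_calculate_moments matrix → Pre_calculate_moments matrix → Spec_calculate_moments matrix (calculate_moments matrix)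

-- ===== LEMMAS AND PROOFS =====

-- A's inner loop as three sums
theorem pv_innerA (r : List Int) (i : Int) (L : List Int) (s : Int × Int × Int) :
    L.foldl (fun (s : Int × Int × Int) j =>
        if PySem.List.pyGetD r j 0 = 1 then (s.1 + 1, s.2.1 + (j + 1), s.2.2 + (i + 1)) else s) s
    = (s.1 + (L.map (fun j => if PySem.List.pyGetD r j 0 = 1 then (1 : Int) else 0)).sum,
       s.2.1 + (L.map (fun j => (j + 1) * (if PySem.List.pyGetD r j 0 = 1 then (1 : Int) else 0))).sum,
       s.2.2 + (i + 1) * (L.map (fun j => if PySem.List.pyGetD r j 0 = 1 then (1 : Int) else 0)).sum) := by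
  induction L generalizing s with
  | nil => simp
  | cons j L ih =>
    simp only [List.foldl_cons, List.map_cons, List.sum_cons]
    rw [ih]
    by_cases h : PySem.List.pyGetD r j 0 = 1 <;>
      simp [h, mul_add, add_assoc]

-- A's outer loop as three sums
theorem pv_outerA (matrix : List (List Int)) (n : Int) (L : List Int) (s : Int × Int × Int) :
    L.foldl (fun (s : Int × Int × Int) i =>
        (PySem.List.pyRange 0 n 1).foldl
          (fun (s : Int × Int × Int) j =>
            if PySem.List.pyGetD (PySem.List.pyGetD matrix i []) j 0 = 1 then
              (s.1 + 1, s.2.1 + (j + 1), s.2.2 + (i + 1))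
            else s) s) s
    = (s.1 + (L.map (fun i => ((PySem.List.pyRange 0 n 1).map
          (fun j => if PySem.List.pyGetD (PySem.List.pyGetD matrix i []) j 0 = 1 then (1 : Int) else 0)).sum)).sum,
       s.2.1 + (L.map (fun i => ((PySem.List.pyRange 0 n 1).map
          (fun j => (j + 1) * (if PySem.List.pyGetD (PySem.List.pyGetD matrix i []) j 0 = 1 then (1 : Int) else 0))).sum)).sum,
       s.2.2 + (L.map (fun i => (i + 1) * ((PySem.List.pyRange 0 n 1).map
          (fun j => if PySem.List.pyGetD (PySem.List.pyGetD matrix i []) j 0 = 1 then (1 : Int) else 0)).sum)).sum) := by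
  induction L generalizing s with
  | nil => simp
  | cons i L ih =>
    simp only [List.foldl_cons, List.map_cons, List.sum_cons]
    rw [pv_innerA, ih]
    simp [add_assoc]

-- swapping two nested list sums
theorem pv_sum_add (L : List Int) (f g : Int → Int) :
    (L.map (fun x => f x + g x)).sum = (L.map f).sum + (L.map g).sum := by
  induction L with
  | nil => simp
  | cons x L ih => simp only [List.map_cons, List.sum_cons]; rw [ih]; ring

theorem pv_sum_swap (L1 L2 : List Int) (g : Int → Int → Int) :
    (L1.map (fun a => (L2.map (g a)).sum)).sum
    = (L2.map (fun b => (L1.map (fun a => g a b)).sum)).sum := by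
  induction L1 with
  | nil => simp
  | cons a L1 ih =>
    simp only [List.map_cons, List.sum_cons]
    rw [ih, ← pv_sum_add]

-- pulling a constant factor into a list sum
theorem pv_mul_sum (c : Int) (L : List Int) (f : Int → Int) :
    c * (L.map f).sum = (L.map (fun x => c * f x)).sum := by
  induction L with
  | nil => simp
  | cons x L ih => simp only [List.map_cons, List.sum_cons]; rw [← ih]; ring

-- a map over rows equals a map over pyRange indices
theorem pv_map_rows (matrix : List (List Int)) (f : List Int → Int) :
    (matrix.map f).sum
    = (((PySem.List.pyRange 0 (matrix.length : Int) 1).map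
        (fun i => f (PySem.List.pyGetD matrix i []))).sum) := by
  conv_lhs => rw [← PySem.List.map_pyGetD_pyRange_zero' matrix []]
  rw [List.map_map]
  rfl

theorem calculate_moments_eq_alt (matrix : List (List Int)) :
    calculate_moments matrix = calculate_moments_alt matrix := by
  cases matrix with
  | nil => rfl
  | cons r rest =>
    unfold calculate_moments calculate_moments_alt
    simp only [PySem.List.pyGetD_zero_cons, List.headD_cons,
      if_neg (List.cons_ne_nil r rest)]
    rw [pv_outerA]
    simp only [zero_add, Prod.mk.injEq]
    refine ⟨?_, ?_, ?_⟩
    · -- m10: swap the two sums, then pull (j + 1) out per column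
      rw [pv_sum_swap (PySem.List.pyRange 0 ((r :: rest).length : Int) 1)
        (PySem.List.pyRange 0 (r.length : Int) 1)
        (fun i j => (j + 1) * (if PySem.List.pyGetD (PySem.List.pyGetD (r :: rest) i []) j 0 = 1 then (1 : Int) else 0))]
      refine congrArg List.sum (List.map_congr_left fun j _ => ?_)
      rw [pv_map_rows (r :: rest) (fun row => if PySem.List.pyGetD row j 0 = 1 then (1 : Int) else 0)]
      rw [pv_mul_sum]
    · trivial
    · -- m00: a row-wise sum is the pyRange-indexed sum
      rw [pv_map_rows (r :: rest) (fun row =>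
        ((PySem.List.pyRange 0 (r.length : Int) 1).map
          (fun j => if PySem.List.pyGetD row j 0 = 1 then (1 : Int) else 0)).sum)]

-- ===== VERDICT (by name: the statement is the Claim_ definition above) =====
theorem calculate_moments_spec : Claim_equal_calculate_moments := by
  intro matrix _ _
  unfold Spec_calculate_moments
  exact calculate_moments_eq_alt matrix
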